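-- pv_equiv track=rewrite | github.com/cameronabrams/recursive-binary-decomposition | rbd.py | dbr
-- ===== SOURCE A (Python) =====
-- def dbr(L):
--     n=len(L)
--     sum=0
--     for i in range(n):
--         x=0
--         for j in range(i+1):
--             x+=L[j]
--         sum+=2**x
--     return sum
-- ===== SOURCE B (Python) =====
-- def dbr(L):
--     s = 0
--     total = 0
--     for v in L:
--         s += v
--         total += 2**s
--     return total
-- ===== Notes on version B (the rewrite author's own statement) =====
-- stated objective: alternative
-- what changed: B maintains the running prefix sum in a single pass instead of recomputing each prefix sum with an inner loop over the whole prefix.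
-- outside the precondition, e.g. on dbr([-1]): A returns 0.5, B returns 0.5
import Mathlib
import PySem

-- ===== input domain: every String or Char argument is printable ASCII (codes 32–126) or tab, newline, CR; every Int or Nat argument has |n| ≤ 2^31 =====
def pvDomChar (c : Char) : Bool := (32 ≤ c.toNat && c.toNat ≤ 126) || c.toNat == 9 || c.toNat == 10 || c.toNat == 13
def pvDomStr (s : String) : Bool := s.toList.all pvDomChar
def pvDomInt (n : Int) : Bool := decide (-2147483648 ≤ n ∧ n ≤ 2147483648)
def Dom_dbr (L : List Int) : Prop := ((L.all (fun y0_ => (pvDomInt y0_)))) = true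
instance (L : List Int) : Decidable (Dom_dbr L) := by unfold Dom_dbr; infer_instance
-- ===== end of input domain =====

-- B replaces A's nested prefix-sum recomputation by a single pass carrying the running
-- prefix sum (objective: alternative single-pass decomposition).

-- ===== PORT A =====
-- '2**x' is ported as '2 ^ x.toNat': exact whenever x ≥ 0, which Pre_dbr guarantees
-- (Python returns a float for negative x, outside the declared Int return type).
def dbr (L : List Int) : Int :=
  (PySem.List.pyRange 0 (L.length : Int) 1).foldl
    (fun sum i =>
      sum + 2 ^ ((PySem.List.pyRange 0 (i + 1) 1).foldl
                    (fun x j => x + PySem.List.pyGetD L j 0) 0).toNat)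
    0

-- ===== PORT B =====
def dbr_alt (L : List Int) : Int :=
  (L.foldl (fun (p : Int × Int) v => (p.1 + v, p.2 + 2 ^ (p.1 + v).toNat)) (0, 0)).2

-- ===== PRECONDITION & SPEC =====
-- Pre_ excludes lists with a negative prefix sum: there Python's 2**x returns a float,
-- not an int of the declared return type (A and B return the same float).
def Pre_dbr (L : List Int) : Prop := ∀ p ∈ L.scanl (· + ·) 0, 0 ≤ p
instance (L : List Int) : Decidable (Pre_dbr L) := by unfold Pre_dbr; infer_instance
def pvWitness_dbr : List Int := [2, -1, 3, 0]

def Spec_dbr (L : List Int) (out : Int) : Prop := out = dbr_alt L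
instance (L : List Int) (out : Int) : Decidable (Spec_dbr L out) := by unfold Spec_dbr; infer_instance

-- ===== CLAIM (what is proved, stated in full; the proofs are below) =====
def Claim_equal_dbr : Prop := ∀ (L : List Int), Dom_dbr L → Pre_dbr L → Spec_dbr L (dbr L)

-- ===== LEMMAS AND PROOFS =====

-- A's inner loop computes the sum of the first k elements.
theorem dbr_inner (L : List Int) (k : Nat) (hk : k ≤ L.length) :
    (PySem.List.pyRange 0 (k : Int) 1).foldl
      (fun x j => x + PySem.List.pyGetD L j 0) 0 = (L.take k).sum := by
  induction k with
  | zero => simp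
  | succ n ih =>
      have h1 : ((n : Int) + 1 : Int) = ((n + 1 : Nat) : Int) := by push_cast; ring
      have hs : PySem.List.pyRange 0 ((n + 1 : Nat) : Int) 1
          = PySem.List.pyRange 0 (n : Int) 1 ++ [(n : Int)] := by
        rw [← h1, PySem.List.pyRange_one_succ_right (by positivity)]
      have hn : n < L.length := by omega
      rw [hs, List.foldl_append, List.foldl_cons, List.foldl_nil, ih (by omega)]
      rw [PySem.List.pyGetD_natCast, List.getD_eq_getElem L 0 hn]
      rw [List.take_add_one, List.sum_append]
      simp [List.getElem?_eq_getElem hn]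

-- B's loop, generalized over the starting state
theorem dbr_alt_loop (L : List Int) (s t : Int) :
    L.foldl (fun (p : Int × Int) v => (p.1 + v, p.2 + 2 ^ (p.1 + v).toNat)) (s, t)
      = (s + L.sum,
         t + ((List.range L.length).map
                (fun k => (2 : Int) ^ (s + (L.take (k + 1)).sum).toNat)).sum) := by
  induction L generalizing s t with
  | nil => simp
  | cons a tl ih =>
      rw [List.foldl_cons, ih]
      simp only [Prod.mk.injEq]
      refine ⟨by simp; ring, ?_⟩
      · rw [List.length_cons, List.range_succ_eq_map]
        simp only [List.map_cons, List.map_map, List.sum_cons]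
        have : ((fun k => (2 : Int) ^ (s + ((a :: tl).take (k + 1)).sum).toNat) ∘
                  (fun i => i + 1))
             = (fun k => (2 : Int) ^ (s + a + (tl.take (k + 1)).sum).toNat) := by
          funext k
          simp [List.take_succ_cons]
          ring_nf
        rw [this]
        simp only [List.take_succ_cons, List.take_zero, List.sum_cons, List.sum_nil,
          add_zero]
        ring

theorem dbr_eq_sum (L : List Int) :
    dbr L = ((List.range L.length).map
               (fun k => (2 : Int) ^ ((L.take (k + 1)).sum).toNat)).sum := by
  unfold dbr
  rw [PySem.List.pyRange_one]
  simp only [sub_zero, Int.toNat_natCast, List.foldl_map]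
  have hcong : ∀ (n : Nat), n ≤ L.length → ∀ c : Int,
      (List.range n).foldl
        (fun (sum : Int) (k : Nat) =>
          sum + 2 ^ ((PySem.List.pyRange 0 ((0 : Int) + (k : Int) + 1) 1).foldl
              (fun x j => x + PySem.List.pyGetD L j 0) 0).toNat) c
      = c + ((List.range n).map
              (fun k => (2 : Int) ^ ((L.take (k + 1)).sum).toNat)).sum := by
    intro n
    induction n with
    | zero => simp
    | succ m ih =>
        intro hn c
        rw [List.range_succ, List.foldl_append, List.foldl_cons, List.foldl_nil,
          ih (by omega)]
        have h1 : ((0 : Int) + (m : Int) + 1) = ((m + 1 : Nat) : Int) := by push_cast; ring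
        rw [h1, dbr_inner L (m + 1) (by omega)]
        simp only [List.map_append, List.sum_append, List.map_cons, List.map_nil,
          List.sum_cons, List.sum_nil]
        ring
  rw [hcong L.length le_rfl 0]
  simp

-- ===== VERDICT (by name: the statement is the Claim_ definition above) =====
theorem dbr_spec : Claim_equal_dbr := by
  intro L _ _
  unfold Spec_dbr dbr_alt
  rw [dbr_alt_loop, dbr_eq_sum]
  simp
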